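-- pv_equiv track=rewrite | github.com/kwanlokto/algorithms | computation/math_algorithm/knapsack.py | regular_knapsack
-- ===== SOURCE A (Python) =====
-- def regular_knapsack(bag_size, items):
--     """
--     Maximize total value when only taking 'bag_size' items from 'items'
--
--     OPT(i) = max()
--     Args:
--         bag_size (int): number of items which we can carry
--         items (list): the value of each associated item
--     Returns:
--         list: indices of items which will maximize value
--     """
--     bag_size += 1
--     values = [
--         [[] for _ in range(bag_size)] for _ in range(len(items))
--     ]  # The best value after taking i items
--
--     for item_num in range(len(items)):
--         for items_taken in range(1, bag_size):
--             total = sum_by_idx(items, values[item_num - 1][items_taken])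
--
--             new_total = (  # assume weight 1
--                 sum_by_idx(
--                     items, values[item_num - 1][items_taken - 1]
--                 )
--                 + items[item_num]
--             )
--
--             # OPT[i][j] = max(OPT[i-1][j-1] + val[i], OPT[i-1][j])
--             if total < new_total:
--                 values[item_num][items_taken] = values[item_num - 1][
--                     items_taken - 1
--                 ] + [item_num]
--             else:
--                 values[item_num][items_taken] = values[item_num - 1][
--                     items_taken
--                 ]
--     return values[-1][-1]  # only bc weight is 1
--
-- def sum_by_idx(array, indices):
--     total = 0
--     for idx in indices:
--         total += array[idx]
--     return total
-- ===== SOURCE B (Python) =====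
-- def regular_knapsack(bag_size, items):
--     # All weights are 1, so the best choice of at most bag_size items is simply
--     # the top-bag_size positive values; stable sort keeps the smallest indices on ties.
--     pos = [i for i, v in enumerate(items) if v > 0]
--     pos.sort(key=lambda i: -items[i])
--     return sorted(pos[:bag_size])
-- ===== Notes on version B (the rewrite author's own statement) =====
-- stated objective: faster
-- what changed: Replaces the O(n*k) dynamic-programming table whose every cell is re-summed by index (O(n*k^2) work overall) with a direct greedy selection: take the top-min(k, #positive) items by value via one stable sort and return their indices sorted.
-- intended difference: On a single-item list with a positive value and bag_size >= 2, A reads the row it is currently writing (values[-1] aliases row 0) and returns the same index repeatedly ([0]*bag_size); B returns [0], the intended list of distinct indices. — e.g. on regular_knapsack(2, [5]): A returns [0, 0], B returns [0]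
import Mathlib
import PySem

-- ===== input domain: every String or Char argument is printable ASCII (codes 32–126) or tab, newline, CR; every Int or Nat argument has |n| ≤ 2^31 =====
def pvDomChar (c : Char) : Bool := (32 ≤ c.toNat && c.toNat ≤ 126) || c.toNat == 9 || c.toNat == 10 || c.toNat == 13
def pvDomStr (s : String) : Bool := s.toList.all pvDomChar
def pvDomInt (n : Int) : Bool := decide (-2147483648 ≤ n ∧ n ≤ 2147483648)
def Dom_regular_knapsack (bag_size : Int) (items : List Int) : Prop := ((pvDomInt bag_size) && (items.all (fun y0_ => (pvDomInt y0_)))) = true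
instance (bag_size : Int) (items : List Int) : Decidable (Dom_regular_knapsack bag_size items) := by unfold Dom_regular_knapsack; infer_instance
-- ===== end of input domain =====

-- B replaces A's DP table (each cell re-summed by index) with one stable sort picking the
-- top-bag_size positive values; measurably faster (asymptotic: O(n log n) vs O(n*k^2)).

-- ===== PORT A =====
-- sum_by_idx: the default of pyGetD is only reached where Python would raise IndexError,
-- which never happens on the indices A stores (all are valid positions of `array`).
def sum_by_idx (array : List Int) (indices : List Int) : Int :=
  indices.foldl (fun total idx => total + PySem.List.pyGetD array idx 0) 0

-- aryGetD: Python's a[i] (negative wrap; the default is returned only where Python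
-- raises IndexError, which is unreachable on admitted inputs) — exact via PySem.List.pyIdx?.
def aryGetD {α : Type} (a : Array α) (i : Int) (d : α) : α :=
  match PySem.List.pyIdx? a.size i with
  | some k => a.getD k d
  | none => d

-- one inner-loop iteration of A (body of `for items_taken in range(1, bag_size)`).
-- The DP table is held in Arrays (same cells, same reads/writes in the same order as the
-- Python lists) so the port evaluates efficiently; `setIfInBounds` only writes in range,
-- exactly like Python's in-range `values[item_num][items_taken] = ...`.
def rkInnerA (items : List Int) (i : Int) (m : Array (Array (List Int))) (j : Int) :
    Array (Array (List Int)) :=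
  let a := aryGetD (aryGetD m (i - 1) #[]) j []
  let total := sum_by_idx items a
  let b := aryGetD (aryGetD m (i - 1) #[]) (j - 1) []
  let new_total := sum_by_idx items b + PySem.List.pyGetD items i 0
  if total < new_total then
    m.modify i.toNat (fun r => r.setIfInBounds j.toNat (b ++ [i]))
  else
    m.modify i.toNat (fun r => r.setIfInBounds j.toNat a)

def regular_knapsack (bag_size : Int) (items : List Int) : List Int :=
  let bag := bag_size + 1
  let values : Array (Array (List Int)) :=
    ((PySem.List.pyRange 0 (items.length : Int) 1).map
      (fun _ => ((PySem.List.pyRange 0 bag 1).map (fun _ => ([] : List Int))).toArray)).toArray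
  let final := (PySem.List.pyRange 0 (items.length : Int) 1).foldl
    (fun m i => (PySem.List.pyRange 1 bag 1).foldl (rkInnerA items i) m) values
  -- values[-1][-1]; the defaults are only reached where Python raises IndexError (outside Pre_)
  aryGetD (aryGetD final (-1) #[]) (-1) []

-- ===== PORT B =====
def regular_knapsack_alt (bag_size : Int) (items : List Int) : List Int :=
  let pos := ((PySem.List.enumerate items).filter (fun p => decide (0 < p.2))).map
    (fun p => p.1)
  let possorted := PySem.List.sorted pos (fun i => -(PySem.List.pyGetD items i 0)) false
  let chosen := PySem.List.slice possorted none (some bag_size)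
  PySem.List.sorted chosen (fun x => x) false

-- ===== PRECONDITION & SPEC =====
-- A raises IndexError on empty `items` and on negative `bag_size` (values[-1][-1] on an
-- empty row list); exactly those inputs are excluded.
def Pre_regular_knapsack (bag_size : Int) (items : List Int) : Prop :=
  0 ≤ bag_size ∧ items ≠ []
instance (bag_size : Int) (items : List Int) : Decidable (Pre_regular_knapsack bag_size items) := by
  unfold Pre_regular_knapsack; infer_instance

def pvWitness_regular_knapsack : Int × List Int := (2, [3, 1, 2])

-- On a single-item list with a positive value and bag_size >= 2, A reads the row it is
-- currently writing (values[-1] aliases row 0) and returns the same index repeatedly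
-- ([0]*bag_size); B returns [0], the intended list of distinct indices.
def D_regular_knapsack (bag_size : Int) (items : List Int) : Prop :=
  items.length = 1 ∧ 2 ≤ bag_size ∧ 0 < items.getD 0 0
instance (bag_size : Int) (items : List Int) : Decidable (D_regular_knapsack bag_size items) := by
  unfold D_regular_knapsack; infer_instance

def Spec_regular_knapsack (bag_size : Int) (items : List Int) (out : List Int) : Prop :=
  ¬ D_regular_knapsack bag_size items → out = regular_knapsack_alt bag_size items
instance (bag_size : Int) (items : List Int) (out : List Int) :
    Decidable (Spec_regular_knapsack bag_size items out) := by
  unfold Spec_regular_knapsack; infer_instance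

def pvDiffWitness_regular_knapsack : Int × List Int := (2, [5])
def pvDiffWitnessOut_regular_knapsack : (List Int) × (List Int) := ([0, 0], [0])

-- ===== CLAIM (what is proved, stated in full; the proofs are below) =====
def Claim_unchanged_regular_knapsack : Prop := ∀ (bag_size : Int) (items : List Int), Dom_regular_knapsack bag_size items → Pre_regular_knapsack bag_size items → Spec_regular_knapsack bag_size items (regular_knapsack bag_size items)
def Claim_changed_regular_knapsack : Prop := Dom_regular_knapsack (pvDiffWitness_regular_knapsack.1) (pvDiffWitness_regular_knapsack.2) ∧ Pre_regular_knapsack (pvDiffWitness_regular_knapsack.1) (pvDiffWitness_regular_knapsack.2) ∧ D_regular_knapsack (pvDiffWitness_regular_knapsack.1) (pvDiffWitness_regular_knapsack.2) ∧ regular_knapsack (pvDiffWitness_regular_knapsack.1) (pvDiffWitness_regular_knapsack.2) = pvDiffWitnessOut_regular_knapsack.1 ∧ regular_knapsack_alt (pvDiffWitness_regular_knapsack.1) (pvDiffWitness_regular_knapsack.2) = pvDiffWitnessOut_regular_knapsack.2 ∧ pvDiffWitnessOut_regular_knapsack.1 ≠ pvDiffWitnessOut_regular_knapsack.2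

def Claim_exact_regular_knapsack : Prop := ∀ (bag_size : Int) (items : List Int), Dom_regular_knapsack bag_size items → Pre_regular_knapsack bag_size items → D_regular_knapsack bag_size items → regular_knapsack bag_size items ≠ regular_knapsack_alt bag_size items

-- ===== LEMMAS AND PROOFS =====

-- List-level model of port A (what the Array code computes, cell for cell), used by the proofs
def rkInner (items : List Int) (i : Int) (m : List (List (List Int))) (j : Int) :
    List (List (List Int)) :=
  let prevRow := PySem.List.pyGetD m (i - 1) []
  let total := sum_by_idx items (PySem.List.pyGetD prevRow j [])
  let new_total := sum_by_idx items (PySem.List.pyGetD prevRow (j - 1) []) +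
    PySem.List.pyGetD items i 0
  if total < new_total then
    m.set i.toNat ((PySem.List.pyGetD m i []).set j.toNat
      (PySem.List.pyGetD prevRow (j - 1) [] ++ [i]))
  else
    m.set i.toNat ((PySem.List.pyGetD m i []).set j.toNat (PySem.List.pyGetD prevRow j []))

def regular_knapsack_listver (bag_size : Int) (items : List Int) : List Int :=
  let bag := bag_size + 1
  let values : List (List (List Int)) :=
    (PySem.List.pyRange 0 (items.length : Int) 1).map
      (fun _ => (PySem.List.pyRange 0 bag 1).map (fun _ => ([] : List Int)))
  let final := (PySem.List.pyRange 0 (items.length : Int) 1).foldl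
    (fun m i => (PySem.List.pyRange 1 bag 1).foldl (rkInner items i) m) values
  PySem.List.pyGetD (PySem.List.pyGetD final (-1) []) (-1) []

lemma aryGetD_eq_pyGetD {α : Type} (a : Array α) (i : Int) (d : α) :
    aryGetD a i d = PySem.List.pyGetD a.toList i d := by
  show _ = ((PySem.List.pyIdx? a.toList.length i).bind (fun k => a.toList[k]?)).getD d
  rw [aryGetD, Array.length_toList]
  cases hk : PySem.List.pyIdx? a.size i with
  | none => rfl
  | some k =>
    simp only [Option.bind_some]
    rw [Array.getD_eq_getD_getElem?, Array.getElem?_toList]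

lemma pyGetD_map_f {α β : Type} (f : α → β) (l : List α) (i : Int) (d : α) :
    PySem.List.pyGetD (l.map f) i (f d) = f (PySem.List.pyGetD l i d) := by
  show ((PySem.List.pyIdx? (l.map f).length i).bind (fun k => (l.map f)[k]?)).getD (f d) =
    f (((PySem.List.pyIdx? l.length i).bind (fun k => l[k]?)).getD d)
  rw [List.length_map]
  cases PySem.List.pyIdx? l.length i with
  | none => rfl
  | some k =>
    simp only [Option.bind_some, List.getElem?_map]
    cases l[k]? with
    | none => rfl
    | some v => rfl

lemma aryRow_toList (m : Array (Array (List Int))) (t : Int) :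
    (aryGetD m t #[]).toList = PySem.List.pyGetD (m.toList.map Array.toList) t [] := by
  rw [aryGetD_eq_pyGetD]
  have h := pyGetD_map_f Array.toList m.toList t #[]
  simpa using h.symm

lemma aryCell_eq (m : Array (Array (List Int))) (t u : Int) :
    aryGetD (aryGetD m t #[]) u [] =
      PySem.List.pyGetD (PySem.List.pyGetD (m.toList.map Array.toList) t []) u [] := by
  rw [aryGetD_eq_pyGetD, aryRow_toList]

lemma modify_bridge (m : Array (Array (List Int))) (i : Int) (hi : 0 ≤ i) (j : Int)
    (c : List Int) :
    ((m.modify i.toNat (fun r => r.setIfInBounds j.toNat c)).toList).map Array.toList =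
      ((m.toList).map Array.toList).set i.toNat
        ((PySem.List.pyGetD ((m.toList).map Array.toList) i []).set j.toNat c) := by
  rw [Array.toList_modify, List.modify_eq_set_getElem?]
  cases hg : m.toList[i.toNat]? with
  | none =>
    have hlen : m.toList.length ≤ i.toNat := by
      by_contra hc
      rw [List.getElem?_eq_getElem (by omega)] at hg
      cases hg
    show (m.toList).map Array.toList = _
    rw [List.set_eq_of_length_le (by simpa using hlen)]
  | some r =>
    show ((m.toList.set i.toNat (r.setIfInBounds j.toNat c)).map Array.toList) = _
    rw [List.map_set]
    congr 1
    rw [Array.toList_setIfInBounds]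
    congr 1
    have hpy : PySem.List.pyGetD ((m.toList).map Array.toList) i [] = r.toList := by
      rw [show i = ((i.toNat : Nat) : Int) by omega, PySem.List.pyGetD_natCast,
        List.getD_eq_getElem?_getD, List.getElem?_map, hg]
      rfl
    rw [hpy]

lemma rkInnerA_toList (items : List Int) (i : Int) (hi : 0 ≤ i)
    (m : Array (Array (List Int))) (j : Int) :
    ((rkInnerA items i m j).toList).map Array.toList =
      rkInner items i ((m.toList).map Array.toList) j := by
  show ((if sum_by_idx items (aryGetD (aryGetD m (i - 1) #[]) j []) <
      sum_by_idx items (aryGetD (aryGetD m (i - 1) #[]) (j - 1) []) +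
        PySem.List.pyGetD items i 0 then
      m.modify i.toNat (fun r => r.setIfInBounds j.toNat
        (aryGetD (aryGetD m (i - 1) #[]) (j - 1) [] ++ [i]))
    else
      m.modify i.toNat (fun r => r.setIfInBounds j.toNat
        (aryGetD (aryGetD m (i - 1) #[]) j []))).toList).map Array.toList = _
  rw [aryCell_eq, aryCell_eq, rkInner]
  by_cases hcond : sum_by_idx items (PySem.List.pyGetD
      (PySem.List.pyGetD ((m.toList).map Array.toList) (i - 1) []) j []) <
    sum_by_idx items (PySem.List.pyGetD
      (PySem.List.pyGetD ((m.toList).map Array.toList) (i - 1) []) (j - 1) []) +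
      PySem.List.pyGetD items i 0
  · rw [if_pos hcond, if_pos hcond, modify_bridge m i hi]
  · rw [if_neg hcond, if_neg hcond, modify_bridge m i hi]

lemma innerA_bridge (items : List Int) (i : Int) (hi : 0 ≤ i) :
    ∀ (js : List Int) (m : Array (Array (List Int))),
      ((js.foldl (rkInnerA items i) m).toList).map Array.toList =
        js.foldl (rkInner items i) ((m.toList).map Array.toList) := by
  intro js
  induction js with
  | nil => intro m; rfl
  | cons j js ih =>
    intro m
    simp only [List.foldl_cons]
    rw [ih, rkInnerA_toList items i hi]

lemma outerA_bridge (items : List Int) (bag : Int) :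
    ∀ (js : List Int), (∀ i ∈ js, 0 ≤ i) → ∀ (m : Array (Array (List Int))),
      ((js.foldl (fun m i => (PySem.List.pyRange 1 bag 1).foldl (rkInnerA items i) m)
        m).toList).map Array.toList =
        js.foldl (fun m i => (PySem.List.pyRange 1 bag 1).foldl (rkInner items i) m)
          ((m.toList).map Array.toList) := by
  intro js
  induction js with
  | nil => intro _ m; rfl
  | cons j js ih =>
    intro hall m
    simp only [List.foldl_cons]
    rw [ih (fun x hx => hall x (List.mem_cons_of_mem _ hx)),
      innerA_bridge items j (hall j List.mem_cons_self)]

lemma regular_knapsack_eq_listver (bag_size : Int) (items : List Int) :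
    regular_knapsack bag_size items = regular_knapsack_listver bag_size items := by
  show aryGetD (aryGetD ((PySem.List.pyRange 0 (items.length : Int) 1).foldl
      (fun m i => (PySem.List.pyRange 1 (bag_size + 1) 1).foldl (rkInnerA items i) m)
      (((PySem.List.pyRange 0 (items.length : Int) 1).map
        (fun _ => ((PySem.List.pyRange 0 (bag_size + 1) 1).map
          (fun _ => ([] : List Int))).toArray)).toArray)) (-1) #[]) (-1) [] = _
  rw [aryCell_eq]
  rw [outerA_bridge items (bag_size + 1) _
    (fun i hi => by
      have := PySem.List.mem_pyRange_one.mp hi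
      omega) _]
  rw [List.toList_toArray, List.map_map]
  rfl

-- value of index e in items
def kvF (items : List Int) (e : Int) : Int := PySem.List.pyGetD items e 0

-- the comparison function B's stable sort uses
def beforeF (items : List Int) (a b : Int) : Bool :=
  decide ((-(PySem.List.pyGetD items a 0)) < -(PySem.List.pyGetD items b 0))

-- indices of positive items among the first m, in index order
def posList (items : List Int) (m : Nat) : List Int :=
  ((List.range m).filter (fun t => decide (0 < items.getD t 0))).map (fun (t : Nat) => (t : Int))

-- the stable descending-by-value order of posList (what B's first sort produces)
def rankL (items : List Int) (m : Nat) : List Int :=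
  (posList items m).foldl (fun acc x => PySem.List.insertBy (beforeF items) x acc) []

-- the selection A's cell (prefix m, column j) holds: smallest-index top-j, ascending
def selL (items : List Int) (m j : Nat) : List Int :=
  PySem.List.sorted ((rankL items m).take j) (fun x => x) false

-- functional cell formula (what rkInner writes, reading prevRow P)
def cellF (items : List Int) (P : List (List Int)) (i j : Int) : List Int :=
  if sum_by_idx items (PySem.List.pyGetD P j []) <
      sum_by_idx items (PySem.List.pyGetD P (j - 1) []) + PySem.List.pyGetD items i 0 then
    PySem.List.pyGetD P (j - 1) [] ++ [i]
  else
    PySem.List.pyGetD P j []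


-- relL: the strict order in which B's stable sort ranks positive indices
def relL (items : List Int) (a b : Int) : Prop :=
  kvF items b < kvF items a ∨ (kvF items a = kvF items b ∧ a < b)

lemma insertBy_eq_tw {α : Type} (before : α → α → Bool) (x : α) (l : List α) :
    PySem.List.insertBy before x l =
      l.takeWhile (fun y => !before x y) ++ x :: l.dropWhile (fun y => !before x y) := by
  induction l with
  | nil => simp [PySem.List.insertBy]
  | cons y ys ih =>
    by_cases h : before x y
    · simp [PySem.List.insertBy, h]
    · simp [PySem.List.insertBy, h, ih]

lemma posList_succ (items : List Int) (m : Nat) :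
    posList items (m + 1) = posList items m ++
      (if 0 < items.getD m 0 then [(m : Int)] else []) := by
  have hg : items.getD m 0 = items[m]?.getD 0 := List.getD_eq_getElem?_getD
  by_cases h : 0 < items.getD m 0
  · rw [hg] at h; simp [posList, List.range_succ, List.filter_append, h]
  · rw [hg] at h; simp [posList, List.range_succ, List.filter_append, h]

lemma rankL_succ (items : List Int) (m : Nat) :
    rankL items (m + 1) =
      if 0 < items.getD m 0 then
        PySem.List.insertBy (beforeF items) (m : Int) (rankL items m)
      else rankL items m := by
  have hg : items.getD m 0 = items[m]?.getD 0 := List.getD_eq_getElem?_getD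
  simp only [rankL, posList_succ, List.foldl_append]
  by_cases h : 0 < items.getD m 0
  · rw [hg] at h; simp [h]
  · rw [hg] at h; simp [h]

lemma sum_by_idx_eq (items : List Int) (l : List Int) :
    sum_by_idx items l = (l.map (kvF items)).sum := by
  simp [sum_by_idx, kvF, List.sum_eq_foldl, List.foldl_map]

lemma kv_natCast (items : List Int) (m : Nat) :
    kvF items (m : Int) = items.getD m 0 := by
  simp [kvF]

lemma rank_inv (items : List Int) (m : Nat) :
    (∀ e ∈ rankL items m, 0 ≤ e ∧ e < (m : Int) ∧ 0 < kvF items e) ∧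
      (rankL items m).Pairwise (relL items) := by
  induction m with
  | zero => simp [rankL, posList]
  | succ m ih =>
    rw [rankL_succ]
    by_cases h : 0 < items.getD m 0
    · simp only [h, if_true]
      obtain ⟨hmem, hpw⟩ := ih
      rw [insertBy_eq_tw]
      set pred := fun y => !beforeF items (m : Int) y with hpred
      have hsplit : (rankL items m).takeWhile pred ++ (rankL items m).dropWhile pred
          = rankL items m := List.takeWhile_append_dropWhile
      have hpred_iff : ∀ y, pred y = true ↔ items.getD m 0 ≤ kvF items y := by
        intro y
        simp [hpred, beforeF, kvF]
      constructor
      · intro e he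
        rcases List.mem_append.mp he with h1 | h1
        · have : e ∈ rankL items m := by
            rw [← hsplit]; exact List.mem_append_left _ h1
          have := hmem e this
          exact ⟨this.1, by omega, this.2.2⟩
        · rcases List.mem_cons.mp h1 with rfl | h2
          · exact ⟨by positivity, by omega, by rw [kv_natCast]; exact h⟩
          · have : e ∈ rankL items m := by
              rw [← hsplit]; exact List.mem_append_right _ h2
            have := hmem e this
            exact ⟨this.1, by omega, this.2.2⟩
      · -- pairwise on A1 ++ m :: A2
        have hpw' : ((rankL items m).takeWhile pred ++
            (rankL items m).dropWhile pred).Pairwise (relL items) := by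
          rw [hsplit]; exact hpw
        rw [List.pairwise_append] at hpw' ⊢
        obtain ⟨pw1, pw2, cross⟩ := hpw'
        -- every element of the dropWhile part has value < items.getD m 0
        have hdrop_lt : ∀ b ∈ (rankL items m).dropWhile pred,
            kvF items b < items.getD m 0 := by
          intro b hb
          cases hD : (rankL items m).dropWhile pred with
          | nil => rw [hD] at hb; simp at hb
          | cons hh tt =>
            have hhead : pred hh = false := by
              have hne : (rankL items m).dropWhile pred ≠ [] := by rw [hD]; simp
              have h1 := List.head_dropWhile_not pred hne
              have h2 : (List.dropWhile pred (rankL items m)).head hne = hh := by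
                have h3 := congrArg List.head? hD
                rw [List.head?_eq_some_head] at h3
                simpa using h3
              rwa [h2] at h1
            have hh_lt : kvF items hh < items.getD m 0 := by
              by_contra hc
              have : pred hh = true := (hpred_iff hh).mpr (by omega)
              rw [this] at hhead; cases hhead
            rw [hD] at hb
            rcases List.mem_cons.mp hb with rfl | hb'
            · exact hh_lt
            · rw [hD] at pw2
              have := (List.pairwise_cons.mp pw2).1 b hb'
              rcases this with h1 | h1
              · omega
              · omega
        refine ⟨pw1, ?_, ?_⟩
        · rw [List.pairwise_cons]
          refine ⟨?_, pw2⟩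
          intro b hb
          exact Or.inl (by rw [kv_natCast]; exact hdrop_lt b hb)
        · intro a ha b hb
          have hpa : items.getD m 0 ≤ kvF items a :=
            (hpred_iff a).mp (List.mem_takeWhile_imp ha)
          have ham : a < (m : Int) := by
            have : a ∈ rankL items m := by
              rw [← hsplit]; exact List.mem_append_left _ ha
            exact (hmem a this).2.1
          rcases List.mem_cons.mp hb with rfl | hb'
          · have hx : kvF items ((m : Nat) : Int) = items.getD m 0 := kv_natCast items m
            rcases lt_or_eq_of_le hpa with h1 | h1
            · exact Or.inl (by rw [hx]; exact h1)
            · exact Or.inr ⟨by rw [hx]; exact h1.symm, ham⟩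
          · exact cross a ha b hb'
    · simp only [h, if_false]
      exact ⟨fun e he => ⟨(ih.1 e he).1, by have := (ih.1 e he).2.1; omega,
        (ih.1 e he).2.2⟩, ih.2⟩

lemma rank_pairwise_ne (items : List Int) (m : Nat) : (rankL items m).Nodup := by
  have := (rank_inv items m).2
  refine List.Pairwise.imp ?_ this
  intro a b hab
  rcases hab with h | h
  · intro he; rw [he] at h; omega
  · intro he; omega


lemma rank_antitone (items : List Int) (m : Nat) (p q : Nat) (hpq : p ≤ q)
    (hq : q < (rankL items m).length) :
    kvF items ((rankL items m)[q]) ≤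
      kvF items ((rankL items m)[p]'(lt_of_le_of_lt hpq hq)) := by
  rcases eq_or_lt_of_le hpq with rfl | hlt
  · exact le_refl _
  · have := (List.pairwise_iff_getElem.mp (rank_inv items m).2) p q
      (lt_of_le_of_lt hpq hq) hq hlt
    rcases this with h | h
    · exact le_of_lt h
    · exact le_of_eq h.1.symm

lemma sorted_append_max (A1 T2 : List Int) (x : Int) (hnd : (A1 ++ T2).Nodup)
    (hlt : ∀ a ∈ A1 ++ T2, a < x) :
    PySem.List.sorted (A1 ++ x :: T2) (fun y => y) false =
      PySem.List.sorted (A1 ++ T2) (fun y => y) false ++ [x] := by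
  apply PySem.List.sorted_eq_of_perm_of_pairwise_lt
  · refine (((PySem.List.sorted_perm (A1 ++ T2) (fun y => y) false).append
      (List.Perm.refl [x])).trans ?_)
    rw [List.append_assoc]
    exact List.Perm.append_left A1 (List.perm_append_singleton x T2)
  · rw [List.pairwise_append]
    refine ⟨?_, List.pairwise_singleton _ _, ?_⟩
    · have hle : (PySem.List.sorted (A1 ++ T2) (fun y => y) false).Pairwise
          (fun a b => a ≤ b) := PySem.List.sorted_pairwise (A1 ++ T2) (fun y => y)
      have hnd2 : (PySem.List.sorted (A1 ++ T2) (fun y => y) false).Nodup :=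
        (PySem.List.sorted_perm (A1 ++ T2) (fun y => y) false).nodup_iff.mpr hnd
      exact (hle.and hnd2).imp (fun h => lt_of_le_of_ne h.1 h.2)
    · intro a ha b hb
      rw [List.mem_singleton] at hb
      subst hb
      exact hlt a ((PySem.List.mem_sorted (A1 ++ T2) (fun y => y) false a).mp ha)

lemma val_selL (items : List Int) (m j : Nat) :
    sum_by_idx items (selL items m j) =
      (((rankL items m).take j).map (kvF items)).sum := by
  rw [sum_by_idx_eq]
  exact ((PySem.List.sorted_perm ((rankL items m).take j) (fun x => x) false).map
    (kvF items)).sum_eq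

lemma sum_take_kv (items r : List Int) (j : Nat) (hj : 1 ≤ j) (hj1 : j - 1 < r.length) :
    ((r.take j).map (kvF items)).sum =
      ((r.take (j - 1)).map (kvF items)).sum + kvF items (r[j - 1]'hj1) := by
  have h2 := List.sum_take_succ (r.map (kvF items)) (j - 1) (by simpa using hj1)
  rw [List.map_take, List.map_take]
  have h3 : List.take j (r.map (kvF items)) = List.take ((j - 1) + 1) (r.map (kvF items)) := by
    congr 1; omega
  rw [h3, h2, List.getElem_map]

lemma key_step (items : List Int) (m j : Nat) (hj : 1 ≤ j) :
    (if sum_by_idx items (selL items m j) <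
        sum_by_idx items (selL items m (j - 1)) + items.getD m 0 then
      selL items m (j - 1) ++ [(m : Int)]
    else selL items m j) = selL items (m + 1) j := by
  have hS := val_selL items m
  by_cases hx : 0 < items.getD m 0
  case neg =>
    have hr : rankL items (m + 1) = rankL items m := by rw [rankL_succ, if_neg hx]
    have hsel : selL items (m + 1) j = selL items m j := by unfold selL; rw [hr]
    rw [hsel, if_neg]
    rw [hS, hS]
    by_cases hlen : j ≤ (rankL items m).length
    · rw [sum_take_kv items _ j hj (by omega)]
      have hmem : (rankL items m)[j-1]'(by omega) ∈ rankL items m :=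
        List.getElem_mem _
      have := ((rank_inv items m).1 _ hmem).2.2
      omega
    · rw [List.take_of_length_le (by omega), List.take_of_length_le (by omega)]
      omega
  case pos =>
    have hr : rankL items (m + 1) =
        (rankL items m).takeWhile (fun y => !beforeF items (m : Int) y) ++
          (m : Int) :: (rankL items m).dropWhile (fun y => !beforeF items (m : Int) y) := by
      rw [rankL_succ, if_pos hx]; exact insertBy_eq_tw _ _ _
    set pred := fun y => !beforeF items (m : Int) y with hpredd
    set A1 := (rankL items m).takeWhile pred with hA1
    set A2 := (rankL items m).dropWhile pred with hA2
    set p := A1.length with hp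
    have hsplit : A1 ++ A2 = rankL items m := List.takeWhile_append_dropWhile
    have hpred_iff : ∀ y, pred y = true ↔ items.getD m 0 ≤ kvF items y := by
      intro y; simp [hpredd, beforeF, kvF]
    have hplen : p ≤ (rankL items m).length := by
      rw [← hsplit]; simp [hp]
    by_cases hjp : j ≤ p
    · -- the new item is ranked below the j chosen ones: nothing changes
      have htake : (rankL items m).take j = A1.take j := by
        rw [← hsplit, List.take_append,
          show j - A1.length = 0 by omega]
        simp
      have htake' : (rankL items (m + 1)).take j = A1.take j := by
        rw [hr, List.take_append, show j - A1.length = 0 by omega]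
        simp
      have hsel : selL items (m + 1) j = selL items m j := by
        unfold selL; rw [htake, htake']
      rw [hsel, if_neg]
      rw [hS, hS, sum_take_kv items _ j hj (by omega)]
      have hgetw : (rankL items m)[j-1]'(by omega) = A1[j-1]'(by omega) := by
        have h0 : (rankL items m)[j-1]'(by omega) = (A1 ++ A2)[j-1]'(by
            rw [hsplit]; omega) := List.getElem_of_eq hsplit.symm _
        rw [h0]
        exact List.getElem_append_left (by omega)
      have hmemA1 : A1[j-1]'(by omega) ∈ A1 := List.getElem_mem _
      have hxle : items.getD m 0 ≤ kvF items (A1[j-1]'(by omega)) :=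
        (hpred_iff _).mp (List.mem_takeWhile_imp hmemA1)
      rw [hgetw]
      omega
    · -- the new item displaces the j-th ranked one (or fills a free slot)
      have hjp' : p ≤ j - 1 := by omega
      set T2 := A2.take (j - 1 - p) with hT2
      have htake1 : (rankL items (m + 1)).take j = A1 ++ (m : Int) :: T2 := by
        rw [hr, List.take_append, List.take_of_length_le (by omega)]
        congr 1
        rw [show j - A1.length = (j - 1 - p) + 1 by omega, List.take_succ_cons]
      have htake2 : (rankL items m).take (j - 1) = A1 ++ T2 := by
        rw [← hsplit, List.take_append,
          List.take_of_length_le (by omega), show j - 1 - A1.length = j - 1 - p from rfl]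
      have hnd : (A1 ++ T2).Nodup := by
        rw [← htake2]
        exact (rank_pairwise_ne items m).sublist (List.take_sublist _ _)
      have hlt : ∀ a ∈ A1 ++ T2, a < (m : Int) := by
        intro a ha
        rw [← htake2] at ha
        have : a ∈ rankL items m := List.mem_of_mem_take ha
        exact ((rank_inv items m).1 a this).2.1
      have hsel : selL items (m + 1) j = selL items m (j - 1) ++ [(m : Int)] := by
        unfold selL
        rw [htake1, htake2, sorted_append_max _ _ _ hnd hlt]
      rw [hsel, if_pos]
      rw [hS, hS]
      by_cases hlen : j ≤ (rankL items m).length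
      · rw [sum_take_kv items _ j hj (by omega)]
        have hplt : p < (rankL items m).length := by omega
        -- the element at position p is the head of A2 and has value < items[m]
        have hA2ne : A2 ≠ [] := by
          intro hc
          have := congrArg List.length hsplit
          rw [hc] at this
          simp at this
          omega
        obtain ⟨hh, tt, hD⟩ := List.exists_cons_of_ne_nil hA2ne
        have hheadlt : kvF items hh < items.getD m 0 := by
          have hne : (rankL items m).dropWhile pred ≠ [] := by
            rw [← hA2]; exact hA2ne
          have h1 := List.head_dropWhile_not pred hne
          have h2 : ((rankL items m).dropWhile pred).head hne = hh := by
            have h3 := congrArg List.head? (hA2 ▸ hD :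
              (rankL items m).dropWhile pred = hh :: tt)
            rw [List.head?_eq_some_head] at h3
            simpa using h3
          rw [h2] at h1
          have h4 := (hpred_iff hh)
          rw [h1] at h4
          simp at h4
          have hg : items.getD m 0 = items[m]?.getD 0 := List.getD_eq_getElem?_getD
          omega
        have hgetp : (rankL items m)[p]'hplt = hh := by
          have h0 : (rankL items m)[p]'hplt = (A1 ++ hh :: tt)[p]'(by
              rw [← hD, hsplit]; omega) :=
            List.getElem_of_eq (by rw [← hD, hsplit]) _
          rw [h0, List.getElem_append_right (by omega)]
          simp [hp]
        have hanti := rank_antitone items m p (j - 1) hjp' (by omega)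
        rw [hgetp] at hanti
        omega
      · rw [List.take_of_length_le (le_of_lt (by omega)),
          List.take_of_length_le (by omega)]
        omega


-- ===== A-side machinery: the mutated matrix as a functional row recursion =====

def initRowF (bag : Int) : List (List Int) :=
  (PySem.List.pyRange 0 bag 1).map (fun _ => ([] : List Int))

def updRowF (items : List Int) (P : List (List Int)) (i bag : Int) : List (List Int) :=
  (PySem.List.pyRange 1 bag 1).foldl
    (fun r j => r.set j.toNat (cellF items P i j)) (initRowF bag)

def rowRecF (items : List Int) (bag : Int) : Nat → List (List Int)
  | 0 => initRowF bag
  | i + 1 => updRowF items (rowRecF items bag i) (i : Int) bag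

lemma rkInner_eq (items : List Int) (i : Int) (m : List (List (List Int))) (j : Int) :
    rkInner items i m j =
      m.set i.toNat ((PySem.List.pyGetD m i []).set j.toNat
        (cellF items (PySem.List.pyGetD m (i - 1) []) i j)) := by
  unfold rkInner cellF
  by_cases h : sum_by_idx items (PySem.List.pyGetD (PySem.List.pyGetD m (i - 1) []) j []) <
      sum_by_idx items (PySem.List.pyGetD (PySem.List.pyGetD m (i - 1) []) (j - 1) []) +
        PySem.List.pyGetD items i 0 <;>
    simp [h]

lemma pyGetD_natCast_lt {α : Type} (xs : List α) (i : Nat) (hi : i < xs.length) (d : α) :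
    PySem.List.pyGetD xs (i : Int) d = xs[i] := by
  simp [PySem.List.pyGetD_natCast, List.getD_eq_getElem?_getD, List.getElem?_eq_getElem hi]

lemma pyGetD_set_self {α : Type} (m : List α) (i : Nat) (r : α) (hi : i < m.length) (d : α) :
    PySem.List.pyGetD (m.set i r) (i : Int) d = r := by
  rw [pyGetD_natCast_lt _ _ (by simpa using hi)]
  exact List.getElem_set_self _

lemma pyGetD_set_prev {α : Type} (m : List α) (i : Nat) (r : α) (hi : i < m.length)
    (h2 : i = 0 → 2 ≤ m.length) (d : α) :
    PySem.List.pyGetD (m.set i r) ((i : Int) - 1) d = PySem.List.pyGetD m ((i : Int) - 1) d := by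
  cases i with
  | zero =>
    have hlen : 2 ≤ m.length := h2 rfl
    rw [show ((0 : Nat) : Int) - 1 = -1 by norm_num]
    rw [PySem.List.pyGetD_neg_ofNat _ 1 d (by omega) (by simpa using by omega : 1 ≤ (m.set 0 r).length),
      PySem.List.pyGetD_neg_ofNat m 1 d (by omega) (by omega)]
    simp only [List.length_set]
    exact List.getElem_set_ne (by omega) _
  | succ i =>
    rw [show ((i + 1 : Nat) : Int) - 1 = ((i : Nat) : Int) by push_cast; ring]
    rw [PySem.List.pyGetD_natCast, PySem.List.pyGetD_natCast,
      List.getD_eq_getElem?_getD, List.getD_eq_getElem?_getD,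
      List.getElem?_set_ne (by omega)]

lemma innerFold (items : List Int) (i : Nat) :
    ∀ (js : List Int) (m : List (List (List Int))), (∀ j ∈ js, 1 ≤ j) →
      i < m.length → (i = 0 → 2 ≤ m.length) →
      js.foldl (rkInner items (i : Int)) m =
        m.set i (js.foldl (fun r j => r.set j.toNat
            (cellF items (PySem.List.pyGetD m ((i : Int) - 1) []) (i : Int) j))
          (PySem.List.pyGetD m (i : Int) [])) := by
  intro js
  induction js with
  | nil =>
    intro m _ hi _
    simp only [List.foldl_nil]
    rw [pyGetD_natCast_lt _ _ hi, List.set_getElem_self]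
  | cons j js ih =>
    intro m hall hi h2
    simp only [List.foldl_cons]
    rw [rkInner_eq, Int.toNat_natCast]
    set cell := cellF items (PySem.List.pyGetD m ((i : Int) - 1) []) (i : Int) j with hcell
    set m' := m.set i ((PySem.List.pyGetD m (i : Int) []).set j.toNat cell) with hm'
    have hlen' : i < m'.length := by simp [hm', hi]
    have h2' : i = 0 → 2 ≤ m'.length := by simp [hm']; exact h2
    rw [ih m' (fun x hx => hall x (List.mem_cons_of_mem _ hx)) hlen' h2']
    have hprev : PySem.List.pyGetD m' ((i : Int) - 1) [] =
        PySem.List.pyGetD m ((i : Int) - 1) [] := pyGetD_set_prev m i _ hi h2 []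
    have hself : PySem.List.pyGetD m' (i : Int) [] =
        (PySem.List.pyGetD m (i : Int) []).set j.toNat cell := pyGetD_set_self m i _ hi []
    rw [hprev, hself, hm', List.set_set]

lemma set_map_range {α : Type} (n i : Nat) (f : Nat → α) (x : α) :
    (((List.range n).map f).set i x) =
      (List.range n).map (fun t => if t = i then x else f t) := by
  apply List.ext_getElem?
  intro t
  by_cases ht : t < n
  · by_cases hti : t = i
    · subst hti
      rw [List.getElem?_set_self (by simpa using ht)]
      simp [ht]
    · rw [List.getElem?_set_ne (fun h => hti h.symm)]
      simp [ht, hti]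
  · rw [List.getElem?_eq_none (by simpa using by omega), List.getElem?_eq_none (by simpa using by omega)]


lemma matrix_inv (items : List Int) (bag : Int) (hn : 2 ≤ items.length) :
    ∀ i, i ≤ items.length →
      (List.range i).foldl
          (fun m (t : Nat) => (PySem.List.pyRange 1 bag 1).foldl (rkInner items (t : Int)) m)
          ((List.range items.length).map (fun _ => initRowF bag)) =
        (List.range items.length).map
          (fun t => if t < i then rowRecF items bag (t + 1) else initRowF bag) := by
  intro i
  induction i with
  | zero => intro _; simp
  | succ i ih =>
    intro hi
    rw [List.range_succ, List.foldl_append, ih (by omega), List.foldl_cons, List.foldl_nil]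
    set Mi := (List.range items.length).map
      (fun t => if t < i then rowRecF items bag (t + 1) else initRowF bag) with hMi
    have hlenM : Mi.length = items.length := by simp [hMi]
    have hiM : i < Mi.length := by omega
    rw [innerFold items i _ Mi (fun j hj => (PySem.List.mem_pyRange_one.mp hj).1) hiM
      (fun _ => by omega)]
    have hprev : PySem.List.pyGetD Mi ((i : Int) - 1) [] = rowRecF items bag i := by
      cases i with
      | zero =>
        rw [show ((0 : Nat) : Int) - 1 = -1 by norm_num,
          PySem.List.pyGetD_neg_ofNat Mi 1 [] (by omega) (by omega)]
        simp only [hMi, List.getElem_map, Nat.not_lt_zero, if_false]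
        rfl
      | succ s =>
        rw [show ((s + 1 : Nat) : Int) - 1 = ((s : Nat) : Int) by push_cast; ring,
          pyGetD_natCast_lt _ _ (by omega)]
        simp only [hMi, List.getElem_map, List.getElem_range]
        rw [if_pos (by omega)]
    have hcur : PySem.List.pyGetD Mi (i : Int) [] = initRowF bag := by
      rw [pyGetD_natCast_lt _ _ hiM]
      simp only [hMi, List.getElem_map, List.getElem_range]
      rw [if_neg (by omega)]
    rw [hprev, hcur]
    show Mi.set i (updRowF items (rowRecF items bag i) (i : Int) bag) = _
    rw [hMi, set_map_range]
    apply List.map_congr_left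
    intro t ht
    rw [List.mem_range] at ht
    by_cases h1 : t = i
    · subst h1
      rw [if_pos rfl, if_pos (by omega)]
      rfl
    · by_cases h2 : t < i
      · rw [if_neg h1, if_pos h2, if_pos (by omega)]
      · rw [if_neg h1, if_neg h2, if_neg (by omega)]

lemma foldl_set_getElem? {α : Type} (f : Int → α) :
    ∀ (js : List Int) (r0 : List α), js.Pairwise (· < ·) → (∀ j ∈ js, 1 ≤ j) →
      ∀ (jn : Nat),
      (js.foldl (fun r j => r.set j.toNat (f j)) r0)[jn]? =
        if (jn : Int) ∈ js ∧ jn < r0.length then some (f (jn : Int)) else r0[jn]? := by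
  intro js
  induction js with
  | nil => intro r0 _ _ jn; simp
  | cons j js ih =>
    intro r0 hpw hall jn
    simp only [List.foldl_cons]
    have hj1 : 1 ≤ j := hall j List.mem_cons_self
    rw [ih (r0.set j.toNat (f j)) (List.pairwise_cons.mp hpw).2
      (fun x hx => hall x (List.mem_cons_of_mem _ hx)) jn]
    simp only [List.length_set]
    by_cases heq : (jn : Int) = j
    · have hnotin : ¬ ((jn : Int) ∈ js) := by
        intro hc
        have := (List.pairwise_cons.mp hpw).1 _ hc
        omega
      rw [if_neg (fun h => hnotin h.1)]
      have htn : j.toNat = jn := by omega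
      by_cases hlt : jn < r0.length
      · rw [if_pos ⟨by rw [heq]; exact List.mem_cons_self, hlt⟩, htn, heq,
          List.getElem?_set_self (by omega)]
      · rw [if_neg (fun h => hlt h.2), htn, List.getElem?_eq_none (by simp; omega),
          List.getElem?_eq_none (by omega)]
    · have htn : j.toNat ≠ jn := by omega
      rw [List.getElem?_set_ne htn]
      by_cases hin : (jn : Int) ∈ js ∧ jn < r0.length
      · rw [if_pos hin, if_pos ⟨List.mem_cons_of_mem _ hin.1, hin.2⟩]
      · rw [if_neg hin, if_neg (by
          intro hc
          rcases List.mem_cons.mp hc.1 with h | h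
          · exact heq h
          · exact hin ⟨h, hc.2⟩)]

lemma selL_zero (items : List Int) (m : Nat) : selL items m 0 = [] := by
  simp [selL, PySem.List.sorted_eq_nil_iff]

lemma initRow_len (bag : Int) (hbag : 0 ≤ bag) : (initRowF bag).length = bag.toNat := by
  rw [initRowF, List.length_map, show bag = ((bag.toNat : Nat) : Int) by omega,
    PySem.List.pyRange_zero_natCast]
  simp
  omega

lemma rowRec_eq (items : List Int) (bag : Int) (hbag : 1 ≤ bag) :
    ∀ m, rowRecF items bag m = (List.range bag.toNat).map (fun j => selL items m j) := by
  intro m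
  induction m with
  | zero =>
    show initRowF bag = _
    rw [initRowF, show bag = ((bag.toNat : Nat) : Int) by omega,
      PySem.List.pyRange_zero_natCast, List.map_map]
    simp only [Int.toNat_natCast]
    apply List.map_congr_left
    intro t _
    simp [selL, rankL, posList, PySem.List.sorted_eq_nil_iff]
  | succ m ih =>
    show updRowF items (rowRecF items bag m) (m : Int) bag = _
    rw [updRowF, ih]
    apply List.ext_getElem?
    intro jn
    rw [foldl_set_getElem? _ _ _ (PySem.List.pairwise_lt_pyRange_one 1 bag)
      (fun j hj => (PySem.List.mem_pyRange_one.mp hj).1) jn]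
    have hlen0 : (initRowF bag).length = bag.toNat := initRow_len bag (by omega)
    by_cases hjn : jn < bag.toNat
    · rw [List.getElem?_map, List.getElem?_range hjn]
      by_cases hj1 : 1 ≤ jn
      · rw [if_pos ⟨PySem.List.mem_pyRange_one.mpr ⟨by omega, by omega⟩, by omega⟩]
        simp only [Option.map_some]
        congr 1
        -- cellF on the selL row equals selL at m+1 (key_step)
        have hP1 : PySem.List.pyGetD ((List.range bag.toNat).map (fun j => selL items m j))
            ((jn : Nat) : Int) [] = selL items m jn := by
          rw [pyGetD_natCast_lt _ _ (by simp [hjn])]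
          simp
        have hP2 : PySem.List.pyGetD ((List.range bag.toNat).map (fun j => selL items m j))
            (((jn : Nat) : Int) - 1) [] = selL items m (jn - 1) := by
          rw [show ((jn : Nat) : Int) - 1 = (((jn - 1 : Nat) : Nat) : Int) by omega,
            pyGetD_natCast_lt _ _ (by simp; omega)]
          simp
        rw [cellF, hP1, hP2]
        have hx : PySem.List.pyGetD items ((m : Nat) : Int) 0 = items.getD m 0 :=
          kv_natCast items m
        rw [hx]
        exact key_step items m jn hj1
      · have hjn0 : jn = 0 := by omega
        subst hjn0
        rw [if_neg (by
          intro hc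
          exact absurd (PySem.List.mem_pyRange_one.mp hc.1).1 (by norm_num))]
        have hL : (initRowF bag)[0]? = some [] := by
          rw [initRowF, show bag = ((bag.toNat : Nat) : Int) by omega,
            PySem.List.pyRange_zero_natCast, List.map_map, List.getElem?_map,
            List.getElem?_range (by simpa using hjn)]
          rfl
        rw [hL]
        simp [selL_zero]
    · rw [if_neg (fun hc => hjn (by omega)),
        List.getElem?_eq_none (by omega), List.getElem?_eq_none (by simp; omega)]


-- ===== B-side bridge =====

lemma enum_aux (xs : List Int) : ∀ (s : Int),
    ((PySem.List.enumerate xs s).filter (fun p => decide (0 < p.2))).map (fun p => p.1) =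
      ((List.range xs.length).filter (fun t => decide (0 < xs.getD t 0))).map
        (fun (t : Nat) => s + (t : Int)) := by
  induction xs with
  | nil => intro s; simp [PySem.List.enumerate]
  | cons x t ih =>
    intro s
    rw [show PySem.List.enumerate (x :: t) s = (s, x) :: PySem.List.enumerate t (s + 1)
      from rfl]
    rw [List.filter_cons]
    have hr : List.range (x :: t).length = 0 :: (List.range t.length).map (· + 1) := by
      simp [List.range_succ_eq_map]
    rw [hr, List.filter_cons]
    have htail : (List.filter (fun t_1 => decide (0 < (x :: t).getD t_1 0))
        ((List.range t.length).map (· + 1))).map (fun (t : Nat) => s + (t : Int)) =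
        ((List.range t.length).filter (fun u => decide (0 < t.getD u 0))).map
          (fun (u : Nat) => (s + 1) + (u : Int)) := by
      rw [List.filter_map, List.map_map]
      rw [List.filter_congr (fun u _ => by
        show decide (0 < (x :: t).getD (u + 1) 0) = decide (0 < t.getD u 0)
        rw [List.getD_cons_succ])]
      apply List.map_congr_left
      intro u _
      show s + ((u + 1 : Nat) : Int) = (s + 1) + (u : Int)
      push_cast
      ring
    by_cases hx : 0 < x
    · rw [if_pos (by simpa using hx), if_pos (by simpa using hx)]
      rw [List.map_cons, List.map_cons, htail, ih (s + 1)]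
      norm_num
    · rw [if_neg (by simpa using hx), if_neg (by simpa using hx), htail, ih (s + 1)]

lemma B_eq (bag_size : Int) (items : List Int) (hk : 0 ≤ bag_size) :
    regular_knapsack_alt bag_size items = selL items items.length bag_size.toNat := by
  show PySem.List.sorted (PySem.List.slice (PySem.List.sorted
    (((PySem.List.enumerate items).filter (fun p => decide (0 < p.2))).map (fun p => p.1))
    (fun i => -(PySem.List.pyGetD items i 0)) false) none (some bag_size)) (fun x => x) false = _
  have hpos : ((PySem.List.enumerate items).filter (fun p => decide (0 < p.2))).map
      (fun p => p.1) = posList items items.length := by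
    rw [enum_aux items 0, posList]
    apply List.map_congr_left
    intro t _
    omega
  have h1 : PySem.List.sorted
      (((PySem.List.enumerate items).filter (fun p => decide (0 < p.2))).map (fun p => p.1))
      (fun i => -(PySem.List.pyGetD items i 0)) false = rankL items items.length := by
    rw [PySem.List.sorted_eq_foldl_insertBy, hpos]
    rfl
  rw [h1, PySem.List.slice_to _ hk]
  rfl

-- ===== A-side final assembly (two or more items) =====

lemma A_eq_of_two_le (bag_size : Int) (items : List Int) (hk : 0 ≤ bag_size)
    (hn : 2 ≤ items.length) :
    regular_knapsack_listver bag_size items = selL items items.length bag_size.toNat := by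
  show PySem.List.pyGetD (PySem.List.pyGetD
    ((PySem.List.pyRange 0 (items.length : Int) 1).foldl
      (fun m i => (PySem.List.pyRange 1 (bag_size + 1) 1).foldl (rkInner items i) m)
      ((PySem.List.pyRange 0 (items.length : Int) 1).map
        (fun _ => (PySem.List.pyRange 0 (bag_size + 1) 1).map (fun _ => ([] : List Int)))))
    (-1) []) (-1) [] = _
  rw [PySem.List.pyRange_zero_natCast, List.foldl_map, List.map_map]
  have hM := matrix_inv items (bag_size + 1) hn items.length (le_refl _)
  rw [show ((fun _ => (PySem.List.pyRange 0 (bag_size + 1) 1).map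
      (fun _ => ([] : List Int))) ∘ (fun (k : Nat) => (k : Int))) =
    (fun (_ : Nat) => initRowF (bag_size + 1)) from rfl]
  rw [hM]
  set M := (List.range items.length).map
    (fun t => if t < items.length then rowRecF items (bag_size + 1) (t + 1)
      else initRowF (bag_size + 1)) with hMdef
  have hlen1 : M.length = items.length := by simp [hMdef]
  have hrow : PySem.List.pyGetD M (-1) [] =
      rowRecF items (bag_size + 1) items.length := by
    rw [PySem.List.pyGetD_neg_ofNat M 1 [] (by omega) (by omega)]
    simp only [hMdef, List.getElem_map, List.getElem_range, List.length_map,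
      List.length_range]
    rw [if_pos (by omega), show items.length - 1 + 1 = items.length by omega]
  rw [hrow, rowRec_eq items (bag_size + 1) (by omega)]
  rw [PySem.List.pyGetD_neg_ofNat
    ((List.range (bag_size + 1).toNat).map (fun j => selL items items.length j)) 1 []
    (by omega) (by simp; omega)]
  simp only [List.length_map, List.length_range, List.getElem_map, List.getElem_range]
  congr 1
  omega


-- ===== the single-item cases (no aliasing effect outside D_) =====

lemma pyGetD_all_nil (row : List (List Int)) (h : ∀ c ∈ row, c = ([] : List Int)) (t : Int) :
    PySem.List.pyGetD row t [] = [] := by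
  show (PySem.List.pyGet? row t).getD [] = []
  cases hg : PySem.List.pyGet? row t with
  | none => rfl
  | some v => exact h v (PySem.List.mem_of_pyGet?_eq_some row hg)

lemma aliased_nil (items : List Int) (hx : PySem.List.pyGetD items 0 0 ≤ 0) :
    ∀ (js : List Int) (row : List (List Int)), (∀ c ∈ row, c = ([] : List Int)) →
      ∃ row', js.foldl (rkInner items 0) [row] = [row'] ∧
        row'.length = row.length ∧ ∀ c ∈ row', c = ([] : List Int) := by
  intro js
  induction js with
  | nil => intro row h; exact ⟨row, rfl, rfl, h⟩
  | cons j js ih =>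
    intro row h
    simp only [List.foldl_cons]
    have hstep : rkInner items 0 [row] j = [row.set j.toNat []] := by
      rw [rkInner_eq]
      have hprev : PySem.List.pyGetD [row] ((0 : Int) - 1) [] = row := by
        rw [show (0 : Int) - 1 = -1 by norm_num,
          PySem.List.pyGetD_neg_one [row] ([] : List (List Int)) (by simp)]
        simp
      rw [hprev, cellF, pyGetD_all_nil row h j, pyGetD_all_nil row h (j - 1)]
      rw [if_neg (by
        have : sum_by_idx items ([] : List Int) = 0 := rfl
        rw [this]
        omega)]
      rw [PySem.List.pyGetD_zero_cons]
      rfl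
    rw [hstep]
    obtain ⟨row', h1, h2, h3⟩ := ih (row.set j.toNat []) (fun c hc => by
      rcases List.mem_or_eq_of_mem_set hc with h' | h'
      · exact h c h'
      · exact h')
    exact ⟨row', h1, by simpa using h2, h3⟩

lemma A_one_nonpos (bag_size : Int) (items : List Int)
    (hn : items.length = 1) (hx : items.getD 0 0 ≤ 0) :
    regular_knapsack_listver bag_size items = [] := by
  show PySem.List.pyGetD (PySem.List.pyGetD
    ((PySem.List.pyRange 0 (items.length : Int) 1).foldl
      (fun m i => (PySem.List.pyRange 1 (bag_size + 1) 1).foldl (rkInner items i) m)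
      ((PySem.List.pyRange 0 (items.length : Int) 1).map
        (fun _ => (PySem.List.pyRange 0 (bag_size + 1) 1).map (fun _ => ([] : List Int)))))
    (-1) []) (-1) [] = []
  rw [hn]
  rw [show ((1 : Nat) : Int) = 1 by norm_num,
    show PySem.List.pyRange 0 1 1 = [0] from rfl]
  simp only [List.map_cons, List.map_nil, List.foldl_cons, List.foldl_nil]
  obtain ⟨row', h1, _, h3⟩ := aliased_nil items
    (by rw [PySem.List.pyGetD_zero]; exact hx)
    (PySem.List.pyRange 1 (bag_size + 1) 1)
    ((PySem.List.pyRange 0 (bag_size + 1) 1).map (fun _ => ([] : List Int)))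
    (by intro c hc; simp at hc; exact hc.2)
  rw [h1, PySem.List.pyGetD_neg_one [row'] ([] : List (List Int)) (by simp)]
  rw [show ([row'].getLast (by simp)) = row' by simp]
  exact pyGetD_all_nil row' h3 (-1)

lemma selL_one_nonpos (items : List Int) (hx : items.getD 0 0 ≤ 0) (j : Nat) :
    selL items 1 j = [] := by
  have hg : items.getD 0 0 = items[0]?.getD 0 := List.getD_eq_getElem?_getD
  have h1 : rankL items 1 = [] := by
    rw [rankL, posList]
    have h2 : ¬ ((0:Int) < items[0]?.getD (0:Int)) := by rw [← hg]; omega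
    simp [h2]
  rw [selL, h1, List.take_nil]
  rfl

lemma A_one_pos_zero (x : Int) : regular_knapsack_listver 0 [x] = [] := by
  show PySem.List.pyGetD (PySem.List.pyGetD
    ((PySem.List.pyRange 0 ((([x] : List Int).length : Nat) : Int) 1).foldl
      (fun m i => (PySem.List.pyRange 1 ((0 : Int) + 1) 1).foldl (rkInner [x] i) m)
      ((PySem.List.pyRange 0 ((([x] : List Int).length : Nat) : Int) 1).map
        (fun _ => (PySem.List.pyRange 0 ((0 : Int) + 1) 1).map (fun _ => ([] : List Int)))))
    (-1) []) (-1) [] = []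
  rw [show (([x] : List Int).length : Nat) = 1 from rfl,
    show ((1 : Nat) : Int) = 1 by norm_num]
  rfl

lemma A_one_pos_one (x : Int) (hx : 0 < x) : regular_knapsack_listver 1 [x] = [0] := by
  show PySem.List.pyGetD (PySem.List.pyGetD
    ((PySem.List.pyRange 0 ((([x] : List Int).length : Nat) : Int) 1).foldl
      (fun m i => (PySem.List.pyRange 1 ((1 : Int) + 1) 1).foldl (rkInner [x] i) m)
      ((PySem.List.pyRange 0 ((([x] : List Int).length : Nat) : Int) 1).map
        (fun _ => (PySem.List.pyRange 0 ((1 : Int) + 1) 1).map (fun _ => ([] : List Int)))))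
    (-1) []) (-1) [] = [0]
  rw [show (([x] : List Int).length : Nat) = 1 from rfl,
    show ((1 : Nat) : Int) = 1 by norm_num,
    show PySem.List.pyRange 0 1 1 = [0] from rfl,
    show PySem.List.pyRange 1 ((1 : Int) + 1) 1 = [1] from rfl,
    show PySem.List.pyRange 0 ((1 : Int) + 1) 1 = [0, 1] from rfl]
  simp only [List.map_cons, List.map_nil, List.foldl_cons, List.foldl_nil]
  rw [rkInner_eq]
  rw [show PySem.List.pyGetD [[([] : List Int), []]] ((0 : Int) - 1) [] = [[], []] from rfl]
  rw [show cellF [x] [[], []] 0 1 =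
    (if sum_by_idx [x] [] < sum_by_idx [x] [] + x then ([] : List Int) ++ [0] else [])
    from rfl]
  rw [if_pos (by
    have h0 : sum_by_idx [x] ([] : List Int) = 0 := rfl
    rw [h0]
    omega)]
  rfl

lemma selL_one_pos (x : Int) (hx : 0 < x) (j : Nat) (hj : 1 ≤ j) :
    selL [x] 1 j = [0] := by
  have h1 : rankL [x] 1 = [0] := by
    rw [rankL, posList]
    have h3 : ((List.range 1).filter
        (fun t => decide (0 < ([x] : List Int).getD t 0))) = [0] := by
      simp [hx]
    rw [h3]
    rfl
  rw [selL, h1, List.take_of_length_le (by simpa using hj)]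
  rfl

lemma sum_by_idx_replicate (items : List Int) :
    ∀ (t : Nat) (a : Int), (List.replicate t (0 : Int)).foldl
      (fun total idx => total + PySem.List.pyGetD items idx 0) a =
        a + t * PySem.List.pyGetD items 0 0 := by
  intro t
  induction t with
  | zero => intro a; simp
  | succ t ih =>
    intro a
    rw [List.replicate_succ, List.foldl_cons, ih]
    push_cast
    ring

lemma sum_by_idx_replicate' (items : List Int) (t : Nat) :
    sum_by_idx items (List.replicate t (0 : Int)) = t * PySem.List.pyGetD items 0 0 := by
  show (List.replicate t (0 : Int)).foldl
    (fun total idx => total + PySem.List.pyGetD items idx 0) 0 = _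
  rw [sum_by_idx_replicate]
  ring

lemma aliased_pos_fold (items : List Int) (bag : Int)
    (hx : 0 < PySem.List.pyGetD items 0 0) :
    ∀ b : Int, 1 ≤ b → b ≤ bag →
      (PySem.List.pyRange 1 b 1).foldl (rkInner items 0)
        [(List.range bag.toNat).map (fun _ => ([] : List Int))] =
      [(List.range bag.toNat).map
        (fun t => if 1 ≤ t ∧ t < b.toNat then List.replicate t (0 : Int) else [])] := by
  intro b hb
  induction b, hb using Int.le_induction with
  | base =>
    intro _
    rw [show PySem.List.pyRange 1 1 1 = [] from rfl, List.foldl_nil]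
    congr 1
    apply List.map_congr_left
    intro t _
    rw [if_neg (by omega)]
  | succ b hb ih =>
    intro hle
    rw [PySem.List.pyRange_one_succ_right hb, List.foldl_append, ih (by omega),
      List.foldl_cons, List.foldl_nil]
    set Rb := (List.range bag.toNat).map
      (fun t => if 1 ≤ t ∧ t < b.toNat then List.replicate t (0 : Int) else []) with hRb
    have hstep : rkInner items 0 [Rb] b = [Rb.set b.toNat (List.replicate b.toNat 0)] := by
      rw [rkInner_eq]
      have hprev : PySem.List.pyGetD [Rb] ((0 : Int) - 1) [] = Rb := by
        rw [show (0 : Int) - 1 = -1 by norm_num,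
          PySem.List.pyGetD_neg_one [Rb] ([] : List (List Int)) (by simp)]
        simp
      rw [hprev]
      have hcb : PySem.List.pyGetD Rb b [] = [] := by
        rw [show b = ((b.toNat : Nat) : Int) by omega,
          pyGetD_natCast_lt _ _ (by simp [hRb]; omega)]
        simp only [hRb, List.getElem_map, List.getElem_range]
        rw [if_neg (by omega)]
      have hcb1 : PySem.List.pyGetD Rb (b - 1) [] = List.replicate (b - 1).toNat (0 : Int) := by
        rw [show b - 1 = (((b - 1).toNat : Nat) : Int) by omega,
          pyGetD_natCast_lt _ _ (by simp [hRb]; omega)]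
        simp only [hRb, List.getElem_map, List.getElem_range]
        by_cases h2 : 2 ≤ b
        · rw [if_pos (by omega)]
          simp
        · rw [if_neg (by omega), show (b - 1).toNat = 0 by omega]
          rfl
      rw [cellF, hcb, hcb1]
      rw [if_pos (by
        have h0 : sum_by_idx items ([] : List Int) = 0 := rfl
        rw [h0, sum_by_idx_replicate']
        have h4 : (0 : Int) ≤ ((b - 1).toNat : Int) := by positivity
        nlinarith)]
      rw [show List.replicate (b - 1).toNat (0 : Int) ++ [(0 : Int)] =
        List.replicate ((b - 1).toNat + 1) (0 : Int) from List.replicate_succ'.symm]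
      rw [show (b - 1).toNat + 1 = b.toNat by omega, PySem.List.pyGetD_zero_cons]
      rfl
    rw [hstep, hRb, set_map_range]
    congr 1
    apply List.map_congr_left
    intro t _
    by_cases h1 : t = b.toNat
    · subst h1
      rw [if_pos rfl, if_pos (by omega)]
    · by_cases h2 : 1 ≤ t ∧ t < b.toNat
      · rw [if_neg h1, if_pos h2, if_pos (by omega)]
      · rw [if_neg h1, if_neg h2, if_neg (by omega)]

lemma A_one_pos_big (x k : Int) (hx : 0 < x) (hk : 2 ≤ k) :
    regular_knapsack_listver k [x] = List.replicate k.toNat (0 : Int) := by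
  show PySem.List.pyGetD (PySem.List.pyGetD
    ((PySem.List.pyRange 0 ((([x] : List Int).length : Nat) : Int) 1).foldl
      (fun m i => (PySem.List.pyRange 1 (k + 1) 1).foldl (rkInner [x] i) m)
      ((PySem.List.pyRange 0 ((([x] : List Int).length : Nat) : Int) 1).map
        (fun _ => (PySem.List.pyRange 0 (k + 1) 1).map (fun _ => ([] : List Int)))))
    (-1) []) (-1) [] = _
  rw [show (([x] : List Int).length : Nat) = 1 from rfl,
    show ((1 : Nat) : Int) = 1 by norm_num,
    show PySem.List.pyRange 0 1 1 = [0] from rfl]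
  simp only [List.map_cons, List.map_nil, List.foldl_cons, List.foldl_nil]
  have hinit : (PySem.List.pyRange 0 (k + 1) 1).map (fun _ => ([] : List Int)) =
      (List.range (k + 1).toNat).map (fun _ => ([] : List Int)) := by
    rw [show k + 1 = (((k + 1).toNat : Nat) : Int) by omega,
      PySem.List.pyRange_zero_natCast, List.map_map]
    rfl
  rw [hinit, aliased_pos_fold [x] (k + 1) (by simpa using hx) (k + 1) (by omega) (le_refl _)]
  rw [PySem.List.pyGetD_neg_one _ ([] : List (List Int)) (by simp)]
  rw [show ([(List.range (k + 1).toNat).map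
      (fun t => if 1 ≤ t ∧ t < (k + 1).toNat then List.replicate t (0 : Int) else [])].getLast
      (by simp)) = (List.range (k + 1).toNat).map
      (fun t => if 1 ≤ t ∧ t < (k + 1).toNat then List.replicate t (0 : Int) else []) by simp]
  rw [PySem.List.pyGetD_neg_ofNat _ 1 ([] : List Int) (by omega) (by simp; omega)]
  simp only [List.length_map, List.length_range, List.getElem_map, List.getElem_range]
  rw [if_pos (by omega), show (k + 1).toNat - 1 = k.toNat by omega]

theorem regular_knapsack_spec : Claim_unchanged_regular_knapsack := by
  unfold Claim_unchanged_regular_knapsack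
  intro bag_size items _hdom hpre hnd
  obtain ⟨hk, hne⟩ := hpre
  rw [B_eq bag_size items hk, regular_knapsack_eq_listver]
  by_cases hn2 : 2 ≤ items.length
  · exact A_eq_of_two_le bag_size items hk hn2
  · have hn1 : items.length = 1 := by
      have : items.length ≠ 0 := by simpa using hne
      omega
    by_cases hx : 0 < items.getD 0 0
    · have hk1 : bag_size ≤ 1 := by
        by_contra hc
        exact hnd ⟨hn1, by omega, hx⟩
      obtain ⟨x, hxeq⟩ := List.length_eq_one_iff.mp hn1
      subst hxeq
      have hx' : (0 : Int) < x := by simpa using hx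
      have hcase : bag_size = 0 ∨ bag_size = 1 := by omega
      rcases hcase with h0 | h0 <;> subst h0
      · show regular_knapsack_listver 0 [x] = selL [x] ([x] : List Int).length (0 : Int).toNat
        rw [show ((0 : Int).toNat) = 0 from rfl, selL_zero]
        exact A_one_pos_zero x
      · show regular_knapsack_listver 1 [x] = selL [x] ([x] : List Int).length (1 : Int).toNat
        rw [show ((1 : Int).toNat) = 1 from rfl, show ([x] : List Int).length = 1 from rfl,
          A_one_pos_one x hx', selL_one_pos x hx' 1 (le_refl _)]
    · rw [A_one_nonpos bag_size items hn1 (by omega), hn1,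
        selL_one_nonpos items (by omega)]

-- ===== VERDICT (by name: the statement is the Claim_ definition above) =====
theorem regular_knapsack_changed : Claim_changed_regular_knapsack := by
  unfold Claim_changed_regular_knapsack; decide

theorem regular_knapsack_tight : Claim_exact_regular_knapsack := by
  unfold Claim_exact_regular_knapsack
  intro bag_size items _hdom hpre hD
  obtain ⟨hn1, hk2, hx⟩ := hD
  obtain ⟨x, rfl⟩ := List.length_eq_one_iff.mp hn1
  have hx' : (0 : Int) < x := by simpa using hx
  rw [regular_knapsack_eq_listver, A_one_pos_big x bag_size hx' hk2,
    B_eq _ _ (by omega), show ([x] : List Int).length = 1 from rfl,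
    selL_one_pos x hx' bag_size.toNat (by omega)]
  intro hc
  have hlen := congrArg List.length hc
  simp at hlen
  omega
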